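-- pv_equiv track=rewrite | github.com/szmelinda02/geopol | file_processer.py | normalize_duplicate_named_entities
-- ===== SOURCE A (Python) =====
-- def normalize_duplicate_named_entities(duplications):
--     duplication_dict = {x[0]: [] for x in duplications}
--     for name in duplication_dict.keys():
--         duplication_dict[name] = [x[1] for x in duplications if x[0] == name]
--
--     normalization_dict = {}
--     for key, value in duplication_dict.items():
--         if len(value) == 1:
--             normalization_dict[key] = value[0]
--         elif len(value) > 1:
--             reference_value = sorted(value, key=len, reverse=True)[0]
--             normalization_dict[key] = reference_value
--     return normalization_dict
-- ===== SOURCE B (Python) =====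
-- def normalize_duplicate_named_entities(duplications):
--     best = {}
--     for name, value in duplications:
--         cur = best.get(name)
--         if cur is None or len(value) > len(cur):
--             best[name] = value
--     return best
-- ===== Notes on version B (the rewrite author's own statement) =====
-- stated objective: faster
-- what changed: Replaces the quadratic per-key rescans of the whole list plus a per-key sort with a single pass over the list that keeps, per name, the first value of maximal length in a dict.
import Mathlib
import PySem

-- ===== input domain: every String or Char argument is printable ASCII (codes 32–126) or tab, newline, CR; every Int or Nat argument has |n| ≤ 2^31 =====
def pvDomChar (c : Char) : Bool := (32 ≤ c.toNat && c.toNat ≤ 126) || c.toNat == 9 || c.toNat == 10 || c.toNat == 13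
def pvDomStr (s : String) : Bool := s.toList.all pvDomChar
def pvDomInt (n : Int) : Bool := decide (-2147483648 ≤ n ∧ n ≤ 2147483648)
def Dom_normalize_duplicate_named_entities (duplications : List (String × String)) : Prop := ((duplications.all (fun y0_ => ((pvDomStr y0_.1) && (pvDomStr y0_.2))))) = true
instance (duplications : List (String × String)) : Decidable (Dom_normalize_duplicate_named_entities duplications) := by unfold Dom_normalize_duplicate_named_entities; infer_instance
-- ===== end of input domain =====

-- B replaces A's per-key rescans of the whole list and per-key sort by one pass keeping the first longest value per name (faster).

-- ===== PORT A =====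
def normalize_duplicate_named_entities (duplications : List (String × String)) : List (String × String) :=
  -- duplication_dict = {x[0]: [] for x in duplications}
  let duplication_dict : PySem.Dict String (List String) :=
    duplications.foldl (fun d x => d.insert x.1 ([] : List String)) PySem.Dict.empty
  -- for name in duplication_dict.keys(): duplication_dict[name] = [x[1] for x in duplications if x[0] == name]
  let duplication_dict2 : PySem.Dict String (List String) :=
    duplication_dict.keys.foldl
      (fun d name => d.insert name ((duplications.filter (fun x => x.1 == name)).map (fun x => x.2)))
      duplication_dict
  -- normalization_dict loop (value[0] / sorted(...)[0] under the nonempty guards, so headI is exact there)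
  let normalization_dict : PySem.Dict String String :=
    duplication_dict2.items.foldl
      (fun nd kv =>
        if kv.2.length == 1 then nd.insert kv.1 kv.2.headI
        else if kv.2.length > 1 then
          nd.insert kv.1 (PySem.List.sorted kv.2 PySem.Str.len true).headI
        else nd)
      PySem.Dict.empty
  normalization_dict.items

-- ===== PORT B =====
def normalize_duplicate_named_entities_alt (duplications : List (String × String)) : List (String × String) :=
  (duplications.foldl
    (fun best p =>
      match best.get? p.1 with
      | none => best.insert p.1 p.2
      | some cur => if PySem.Str.len p.2 > PySem.Str.len cur then best.insert p.1 p.2 else best)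
    (PySem.Dict.empty : PySem.Dict String String)).items

-- ===== PRECONDITION & SPEC =====
def Spec_normalize_duplicate_named_entities (duplications : List (String × String)) (out : List (String × String)) : Prop := out = normalize_duplicate_named_entities_alt duplications
instance (duplications : List (String × String)) (out : List (String × String)) : Decidable (Spec_normalize_duplicate_named_entities duplications out) := by unfold Spec_normalize_duplicate_named_entities; infer_instance

-- ===== CLAIM (what is proved, stated in full; the proofs are below) =====
def Claim_equal_normalize_duplicate_named_entities : Prop := ∀ (duplications : List (String × String)), Dom_normalize_duplicate_named_entities duplications → Spec_normalize_duplicate_named_entities duplications (normalize_duplicate_named_entities duplications)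

-- ===== LEMMAS AND PROOFS =====

-- the values listed for a name, in list order; and the first longest one ("" only reachable for a name not in the list)
def pvGrp (duplications : List (String × String)) (k : String) : List String :=
  (duplications.filter (fun x => x.1 == k)).map (fun x => x.2)

def pvPick (duplications : List (String × String)) (k : String) : String :=
  match pvGrp duplications k with
  | [] => ""
  | v :: vs => vs.foldl (fun b w => if PySem.Str.len w > PySem.Str.len b then w else b) v

lemma headI_insertBy (x y : String) (ys : List String) :
    (PySem.List.insertBy (fun a b => decide (PySem.Str.len b < PySem.Str.len a)) x (y :: ys)).headI
      = if PySem.Str.len y < PySem.Str.len x then x else y := by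
  simp [PySem.List.insertBy]
  split_ifs <;> simp

lemma insertBy_ne_nil (bf : String → String → Bool) (x : String) (l : List String) :
    PySem.List.insertBy bf x l ≠ [] := by
  cases l with
  | nil => simp [PySem.List.insertBy]
  | cons y ys => simp [PySem.List.insertBy]; split_ifs <;> simp

lemma headI_foldl_insertBy (l : List String) : ∀ (acc : List String), acc ≠ [] →
    (l.foldl (fun acc x => PySem.List.insertBy (fun a b => decide (PySem.Str.len b < PySem.Str.len a)) x acc) acc).headI
      = l.foldl (fun b v => if PySem.Str.len v > PySem.Str.len b then v else b) acc.headI := by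
  induction l with
  | nil => intro acc _; rfl
  | cons x xs ih =>
    intro acc hne
    obtain ⟨a, as, rfl⟩ : ∃ a as, acc = a :: as := by
      cases acc with | nil => exact absurd rfl hne | cons a as => exact ⟨a, as, rfl⟩
    simp only [List.foldl_cons]
    rw [ih _ (insertBy_ne_nil _ _ _), headI_insertBy]
    simp [gt_iff_lt]

lemma sorted_rev_headI (v : String) (vs : List String) :
    (PySem.List.sorted (v :: vs) PySem.Str.len true).headI
      = vs.foldl (fun b w => if PySem.Str.len w > PySem.Str.len b then w else b) v := by
  rw [PySem.List.sorted_rev_eq_foldl_insertBy]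
  simp only [List.foldl_cons]
  rw [headI_foldl_insertBy vs (PySem.List.insertBy _ v []) (insertBy_ne_nil _ _ _)]
  simp [PySem.List.insertBy]

lemma grp_ne_nil_of_mem (duplications : List (String × String)) (k : String)
    (h : k ∈ duplications.map (fun x => x.1)) : pvGrp duplications k ≠ [] := by
  obtain ⟨p, hp, rfl⟩ := List.mem_map.mp h
  simp only [pvGrp, ne_eq, List.map_eq_nil_iff, List.filter_eq_nil_iff]
  intro hall
  simpa using hall p hp

-- ---- A-side characterisation ----

lemma get?_foldl_insert_nodup (g : String → List String) :
    ∀ (ks : List String), ks.Nodup → ∀ (d : PySem.Dict String (List String)) (k : String),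
      (ks.foldl (fun d name => d.insert name (g name)) d).get? k
        = if k ∈ ks then some (g k) else d.get? k := by
  intro ks
  induction ks with
  | nil => intro _ d k; simp
  | cons n rest ih =>
    intro hnd d k
    have hrest : rest.Nodup := (List.nodup_cons.mp hnd).2
    simp only [List.foldl_cons]
    rw [ih hrest]
    rw [PySem.Dict.get?_insert]
    by_cases hk : k ∈ rest
    · simp [hk, List.mem_cons, or_true]
    · by_cases hkn : k = n <;> simp [hk, hkn]

lemma set_update_self (s : PySem.Set String) : PySem.Set.update s s = s := by
  rw [PySem.Set.update_eq_append_filter]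
  have : (PySem.Set.ofList s).filter (fun y => !(PySem.Set.contains s y)) = [] := by
    rw [List.filter_eq_nil_iff]
    intro a ha
    have : a ∈ s := (PySem.Set.mem_ofList _ _).mp ha
    simpa using this
  rw [this, List.append_nil]

lemma A_items (duplications : List (String × String)) :
    normalize_duplicate_named_entities duplications
      = (PySem.Set.ofList (duplications.map (fun x => x.1))).map
          (fun k => (k, pvPick duplications k)) := by
  simp only [normalize_duplicate_named_entities]
  have h0 : (duplications.foldl (fun d x => d.insert x.1 ([] : List String))
      PySem.Dict.empty).keys = PySem.Set.ofList (duplications.map (fun x => x.1)) := by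
    rw [PySem.Dict.keys_foldl_insert_key duplications (fun x => x.1)
      (fun _ _ => ([] : List String)) PySem.Dict.empty]
    rw [PySem.Dict.keys_empty, PySem.Set.update_nil_left]
  set d0 : PySem.Dict String (List String) :=
    duplications.foldl (fun d x => d.insert x.1 ([] : List String)) PySem.Dict.empty with hd0
  have hnd0 : d0.keys.Nodup := h0 ▸ PySem.Set.nodup_ofList _
  set d2 : PySem.Dict String (List String) :=
    d0.keys.foldl
      (fun d name => d.insert name
        ((duplications.filter (fun x => x.1 == name)).map (fun x => x.2))) d0 with hd2
  have hk2 : d2.keys = d0.keys := by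
    rw [hd2, PySem.Dict.keys_foldl_insert_key d0.keys (fun name => name)
      (fun _ name => (duplications.filter (fun x => x.1 == name)).map (fun x => x.2)) d0]
    rw [List.map_id', set_update_self]
  have hget2 : ∀ k, d2.get? k = if k ∈ d0.keys then some (pvGrp duplications k) else d0.get? k := by
    intro k
    exact get?_foldl_insert_nodup
      (fun name => (duplications.filter (fun x => x.1 == name)).map (fun x => x.2))
      d0.keys hnd0 d0 k
  have hitems2 : d2.items = d0.keys.map (fun k => (k, pvGrp duplications k)) := by
    rw [PySem.Dict.items_eq_map_keys d2 (hk2 ▸ hnd0) ([] : List String), hk2]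
    refine List.map_congr_left ?_
    intro k hk
    rw [PySem.Dict.getD_eq_get?_getD, hget2 k, if_pos hk]
    rfl
  rw [hitems2, List.foldl_map]
  simp only []
  have hstep : ∀ (acc : PySem.Dict String String) (k : String), k ∈ d0.keys →
      (if (pvGrp duplications k).length == 1 then acc.insert k (pvGrp duplications k).headI
       else if (pvGrp duplications k).length > 1 then
         acc.insert k (PySem.List.sorted (pvGrp duplications k) PySem.Str.len true).headI
       else acc)
      = acc.insert k (pvPick duplications k) := by
    intro acc k hk
    have hkm : k ∈ duplications.map (fun x => x.1) := by
      rw [h0] at hk; exact (PySem.Set.mem_ofList _ _).mp hk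
    have hne := grp_ne_nil_of_mem duplications k hkm
    cases hg : pvGrp duplications k with
    | nil => exact absurd hg hne
    | cons v vs =>
      cases vs with
      | nil => simp [pvPick, hg]
      | cons w ws =>
        rw [if_neg (by simp : ¬ (((v :: w :: ws : List String).length == 1) = true))]
        rw [if_pos (by simp : (v :: w :: ws : List String).length > 1)]
        rw [sorted_rev_headI]
        simp [pvPick, hg]
  rw [PySem.List.foldl_congr_mem d0.keys _
    (fun (acc : PySem.Dict String String) k => acc.insert k (pvPick duplications k))
    PySem.Dict.empty hstep]
  rw [PySem.Dict.items_foldl_insert_fresh d0.keys (fun k => k) (fun k => pvPick duplications k)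
    PySem.Dict.empty (fun a _ => PySem.Dict.contains_empty a) (by rw [List.map_id']; exact hnd0)]
  rw [h0]
  rfl

-- ---- B-side characterisation ----

lemma B_keys_step (d : PySem.Dict String String) (p : String × String) :
    (match d.get? p.1 with
      | none => d.insert p.1 p.2
      | some cur => if PySem.Str.len p.2 > PySem.Str.len cur then d.insert p.1 p.2 else d).keys
      = PySem.Set.add d.keys p.1 := by
  cases h : d.get? p.1 with
  | none =>
    have hc : d.contains p.1 = false := by rw [PySem.Dict.contains_eq_isSome_get?, h]; rfl
    have hnm : p.1 ∉ d.keys := fun hm => by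
      simp [PySem.Dict.contains_eq_decide_mem_keys, hm] at hc
    simp [PySem.Dict.keys_insert_of_not_contains d p.2 hc, PySem.Set.add_of_not_mem hnm]
  | some cur =>
    have hc : d.contains p.1 = true := by rw [PySem.Dict.contains_eq_isSome_get?, h]; rfl
    have hm : p.1 ∈ d.keys := by
      simpa [PySem.Dict.contains_eq_decide_mem_keys] using hc
    have hred : (match some cur with
        | none => d.insert p.1 p.2
        | some cur => if PySem.Str.len p.2 > PySem.Str.len cur then d.insert p.1 p.2 else d)
        = if PySem.Str.len p.2 > PySem.Str.len cur then d.insert p.1 p.2 else d := rfl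
    rw [hred]
    split_ifs <;>
      simp [PySem.Dict.keys_insert_of_contains d p.2 hc, PySem.Set.add_of_mem hm]

lemma B_keys (duplications : List (String × String)) :
    ∀ (d : PySem.Dict String String),
      (duplications.foldl
        (fun best p =>
          match best.get? p.1 with
          | none => best.insert p.1 p.2
          | some cur => if PySem.Str.len p.2 > PySem.Str.len cur then best.insert p.1 p.2 else best)
        d).keys = PySem.Set.update d.keys (duplications.map (fun x => x.1)) := by
  induction duplications with
  | nil => intro d; simp [PySem.Set.update]
  | cons p rest ih =>
    intro d
    simp only [List.foldl_cons, List.map_cons]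
    rw [ih, PySem.Set.update_cons, B_keys_step]

lemma B_get? (duplications : List (String × String)) :
    ∀ (d : PySem.Dict String String) (k : String),
      (duplications.foldl
        (fun best p =>
          match best.get? p.1 with
          | none => best.insert p.1 p.2
          | some cur => if PySem.Str.len p.2 > PySem.Str.len cur then best.insert p.1 p.2 else best)
        d).get? k
      = ((duplications.filter (fun x => x.1 == k)).map (fun x => x.2)).foldl
          (fun o v => match o with
            | none => some v
            | some b => some (if PySem.Str.len v > PySem.Str.len b then v else b))
          (d.get? k) := by
  induction duplications with
  | nil => intro d k; simp
  | cons p rest ih =>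
    intro d k
    by_cases hk : p.1 = k
    · simp only [List.foldl_cons, List.filter_cons, hk, beq_self_eq_true, if_pos, List.map_cons]
      rw [ih]
      congr 1
      rw [← hk]
      cases h : d.get? p.1 with
      | none =>
        rw [PySem.Dict.get?_insert, if_pos rfl]
      | some cur =>
        have hL : (match some cur with
            | none => d.insert p.1 p.2
            | some cur => if PySem.Str.len p.2 > PySem.Str.len cur then d.insert p.1 p.2 else d)
            = if PySem.Str.len p.2 > PySem.Str.len cur then d.insert p.1 p.2 else d := rfl
        have hR : (match some cur with
            | none => some p.2
            | some b => some (if PySem.Str.len p.2 > PySem.Str.len b then p.2 else b))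
            = some (if PySem.Str.len p.2 > PySem.Str.len cur then p.2 else cur) := rfl
        rw [hL, hR]
        split_ifs with hlen
        · rw [PySem.Dict.get?_insert, if_pos rfl]
        · exact h
    · have hne : (p.1 == k) = false := by simpa using hk
      simp only [List.foldl_cons, List.filter_cons, hne, Bool.false_eq_true, if_neg,
        not_false_eq_true]
      rw [ih]
      congr 1
      cases h : d.get? p.1 with
      | none =>
        rw [PySem.Dict.get?_insert, if_neg (fun hkk => hk hkk.symm)]
      | some cur =>
        have hL : (match some cur with
            | none => d.insert p.1 p.2
            | some cur => if PySem.Str.len p.2 > PySem.Str.len cur then d.insert p.1 p.2 else d)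
            = if PySem.Str.len p.2 > PySem.Str.len cur then d.insert p.1 p.2 else d := rfl
        rw [hL]
        split_ifs with hlen
        · rw [PySem.Dict.get?_insert, if_neg (fun hkk => hk hkk.symm)]
        · rfl

lemma ostep_foldl (vs : List String) :
    ∀ (b : String),
      vs.foldl (fun o v => match o with
          | none => some v
          | some b => some (if PySem.Str.len v > PySem.Str.len b then v else b)) (some b)
        = some (vs.foldl (fun b w => if PySem.Str.len w > PySem.Str.len b then w else b) b) := by
  induction vs with
  | nil => intro b; rfl
  | cons v vs ih => intro b; simp only [List.foldl_cons]; rw [ih]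

lemma B_items (duplications : List (String × String)) :
    normalize_duplicate_named_entities_alt duplications
      = (PySem.Set.ofList (duplications.map (fun x => x.1))).map
          (fun k => (k, pvPick duplications k)) := by
  simp only [normalize_duplicate_named_entities_alt]
  set db := duplications.foldl
    (fun best p =>
      match best.get? p.1 with
      | none => best.insert p.1 p.2
      | some cur => if PySem.Str.len p.2 > PySem.Str.len cur then best.insert p.1 p.2 else best)
    (PySem.Dict.empty : PySem.Dict String String) with hdb
  have hkeys : db.keys = PySem.Set.ofList (duplications.map (fun x => x.1)) := by
    rw [hdb, B_keys duplications PySem.Dict.empty, PySem.Dict.keys_empty,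
      PySem.Set.update_nil_left]
  have hnd : db.keys.Nodup := hkeys ▸ PySem.Set.nodup_ofList _
  rw [PySem.Dict.items_eq_map_keys db hnd "", hkeys]
  refine List.map_congr_left ?_
  intro k hk
  have hkm : k ∈ duplications.map (fun x => x.1) := (PySem.Set.mem_ofList _ _).mp hk
  have hne := grp_ne_nil_of_mem duplications k hkm
  congr 1
  rw [PySem.Dict.getD_eq_get?_getD, hdb, B_get? duplications PySem.Dict.empty k,
    PySem.Dict.get?_empty]
  cases hg : pvGrp duplications k with
  | nil => exact absurd hg hne
  | cons v vs =>
    have : (duplications.filter (fun x => x.1 == k)).map (fun x => x.2) = v :: vs := hg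
    rw [this, List.foldl_cons]
    have h1 : (match (none : Option String) with
        | none => some v
        | some b => some (if PySem.Str.len v > PySem.Str.len b then v else b)) = some v := rfl
    rw [h1, ostep_foldl]
    simp [pvPick, hg]

-- ===== VERDICT (by name: the statement is the Claim_ definition above) =====
theorem normalize_duplicate_named_entities_spec : Claim_equal_normalize_duplicate_named_entities := by
  intro duplications _
  unfold Spec_normalize_duplicate_named_entities
  rw [A_items, B_items]
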